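-- pv_equiv track=rewrite | github.com/bashbash96/InterviewPreparation | LeetCode/29. Divide Two Integers.py | divide
-- ===== SOURCE A (Python) =====
-- MAX = pow(2, 31)
--
-- def divide(dividend, divisor):
--     """
--     :type dividend: int
--     :type divisor: int
--     :rtype: int
--     """
--
--     if divisor == 0:
--         raise ValueError("Invalid input")
--
--     if divisor == -1 or divisor == 1:
--         return check_if_flows(divisor * dividend)
--
--     final_sign = get_sign(dividend, divisor)
--
--     dividend, divisor = make_positive(dividend, divisor)
--
--     res = 0
--
--     while dividend >= divisor:
--
--         powers = 1
--         val = divisor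
--
--         while val + val < dividend:
--             val += val
--             powers += powers
--
--         res += powers
--         dividend -= val
--
--     return check_if_flows(res) * final_sign
--
-- def get_sign(dividend, divisor):
--     if dividend < 0 and divisor < 0:
--         return 1
--
--     if dividend < 0 or divisor < 0:
--         return -1
--
--     return 1
--
-- def make_positive(dividend, divisor):
--     if dividend < 0:
--         dividend *= -1
--
--     if divisor < 0:
--         divisor *= -1
--
--     return dividend, divisor
--
-- def check_if_flows(res):
--     if res < -MAX:
--         return -MAX
--
--     if res > (MAX - 1):
--         return MAX - 1
--
--     return res
-- ===== SOURCE B (Python) =====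
-- MAX = pow(2, 31)
--
-- def divide(dividend, divisor):
--     if divisor == 0:
--         raise ValueError("Invalid input")
--     negative = (dividend < 0) != (divisor < 0)
--     a = -dividend if dividend < 0 else dividend
--     b = -divisor if divisor < 0 else divisor
--     if b == 1:
--         q = a
--     else:
--         q = 0
--         i = 31
--         while i >= 0:
--             if (b << i) <= a:
--                 a -= b << i
--                 q += 1 << i
--             i -= 1
--     if negative:
--         q = -q
--     if q < -MAX:
--         return -MAX
--     if q > MAX - 1:
--         return MAX - 1
--     return q
-- ===== Notes on version B (the rewrite author's own statement) =====
-- stated objective: alternative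
-- what changed: A's nested whiles restart the divisor-doubling search from scratch after every subtraction; B makes a single flat descending pass over the 32 bit positions, maintaining one running quotient and remainder (restoring binary long division).
import Mathlib
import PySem

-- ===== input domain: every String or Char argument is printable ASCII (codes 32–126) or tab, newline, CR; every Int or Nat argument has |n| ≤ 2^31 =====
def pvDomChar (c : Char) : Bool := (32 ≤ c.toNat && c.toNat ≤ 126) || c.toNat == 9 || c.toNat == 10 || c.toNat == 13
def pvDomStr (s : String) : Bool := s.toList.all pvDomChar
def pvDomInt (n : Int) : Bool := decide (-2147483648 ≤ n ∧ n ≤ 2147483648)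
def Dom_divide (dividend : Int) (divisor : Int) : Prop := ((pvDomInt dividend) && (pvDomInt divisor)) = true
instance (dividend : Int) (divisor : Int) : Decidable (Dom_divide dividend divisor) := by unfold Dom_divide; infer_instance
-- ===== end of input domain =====

-- B replaces A's restart-the-doubling nested whiles by one flat descending pass over the
-- 32 bit positions maintaining a single running quotient (alternative decomposition).
-- A raises ValueError on divisor == 0; Pre_divide excludes exactly that.

-- ===== PORT A =====
def pvMAX : Int := 2 ^ 31

def getSign (dividend : Int) (divisor : Int) : Int :=
  if dividend < 0 ∧ divisor < 0 then 1
  else if dividend < 0 ∨ divisor < 0 then -1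
  else 1

def makePositive (dividend : Int) (divisor : Int) : Int × Int :=
  (if dividend < 0 then -dividend else dividend,
   if divisor < 0 then -divisor else divisor)

def checkIfFlows (res : Int) : Int :=
  if res < -pvMAX then -pvMAX
  else if res > pvMAX - 1 then pvMAX - 1
  else res

-- inner 'while val + val < dividend' loop (fuel only makes the recursion total;
-- in every reachable call the fuel is large enough that the loop runs to completion)
def innerA (fuel : Nat) (val powers dividend : Int) : Int × Int :=
  match fuel with
  | 0 => (val, powers)
  | f + 1 =>
    if val + val < dividend then innerA f (val + val) (powers + powers) dividend
    else (val, powers)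

-- outer 'while dividend >= divisor' loop
def outerA (fuel : Nat) (dividend divisor res : Int) : Int :=
  match fuel with
  | 0 => res
  | f + 1 =>
    if dividend ≥ divisor then
      let vp := innerA (dividend.toNat + 1) divisor 1 dividend
      outerA f (dividend - vp.1) divisor (res + vp.2)
    else res

def divide (dividend : Int) (divisor : Int) : Int :=
  if divisor = 0 then 0   -- Python raises ValueError here; outside Pre_divide
  else if divisor = -1 ∨ divisor = 1 then checkIfFlows (divisor * dividend)
  else
    let finalSign := getSign dividend divisor
    let ab := makePositive dividend divisor
    let res := outerA (ab.1.toNat + 1) ab.1 ab.2 0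
    checkIfFlows res * finalSign

-- ===== PORT B =====
-- 'while i >= 0' loop of Source B, counting i down from n-1 to 0; (b << i) is b * 2^i (i ≥ 0 here)
def bitLoopB (n : Nat) (q a b : Int) : Int × Int :=
  match n with
  | 0 => (q, a)
  | i + 1 =>
    if b * 2 ^ i ≤ a then bitLoopB i (q + 2 ^ i) (a - b * 2 ^ i) b
    else bitLoopB i q a b

def divide_alt (dividend : Int) (divisor : Int) : Int :=
  if divisor = 0 then 0   -- Python raises ValueError here; outside Pre_divide
  else
    let negative := decide (dividend < 0) != decide (divisor < 0)
    let a := if dividend < 0 then -dividend else dividend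
    let b := if divisor < 0 then -divisor else divisor
    let q := if b = 1 then a else (bitLoopB 32 0 a b).1
    let q := if negative then -q else q
    if q < -pvMAX then -pvMAX
    else if q > pvMAX - 1 then pvMAX - 1
    else q

-- ===== PRECONDITION & SPEC =====
def Pre_divide (_dividend : Int) (divisor : Int) : Prop := divisor ≠ 0
instance (dividend : Int) (divisor : Int) : Decidable (Pre_divide dividend divisor) := by
  unfold Pre_divide; infer_instance

def pvWitness_divide : Int × Int := (7, 2)

def Spec_divide (dividend : Int) (divisor : Int) (out : Int) : Prop := out = divide_alt dividend divisor
instance (dividend : Int) (divisor : Int) (out : Int) : Decidable (Spec_divide dividend divisor out) := by unfold Spec_divide; infer_instance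

-- ===== CLAIM (what is proved, stated in full; the proofs are below) =====
def Claim_equal_divide : Prop := ∀ (dividend : Int) (divisor : Int), Dom_divide dividend divisor → Pre_divide dividend divisor → Spec_divide dividend divisor (divide dividend divisor)

-- ===== LEMMAS AND PROOFS =====

-- A's inner loop: starting from val = powers * b with 1 ≤ powers and val ≤ d,
-- it returns (p * b, p) with 1 ≤ p, powers ≤ p and p * b ≤ d, given enough fuel.
lemma innerA_spec (fuel : Nat) : ∀ (powers d b : Int), 1 ≤ powers → 1 ≤ b →
    powers * b ≤ d → (d - powers * b).toNat < fuel →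
    ∃ p, innerA fuel (powers * b) powers d = (p * b, p) ∧ 1 ≤ p ∧ p * b ≤ d := by
  induction fuel with
  | zero => intro powers d b _ _ _ h; omega
  | succ f ih =>
    intro powers d b hp hb hle hfuel
    unfold innerA
    by_cases hc : powers * b + powers * b < d
    · simp only [hc, if_pos]
      have h2 : powers * b + powers * b = (powers + powers) * b := by ring
      rw [h2]
      have hpb : 1 ≤ powers * b := by nlinarith
      exact ih (powers + powers) d b (by omega) hb (by omega) (by omega)
    · simp only [hc, if_neg, not_false_iff]
      exact ⟨powers, rfl, hp, hle⟩

lemma ediv_zero_of_lt {a b : Int} (h0 : 0 ≤ a) (h : a < b) : a / b = 0 :=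
  Int.ediv_eq_zero_of_lt h0 h

-- A's outer loop computes res + d / b
lemma outerA_spec (fuel : Nat) : ∀ (d b res : Int), 0 ≤ d → 1 ≤ b →
    d.toNat < fuel → outerA fuel d b res = res + d / b := by
  induction fuel with
  | zero => intro d b res _ _ h; omega
  | succ f ih =>
    intro d b res hd hb hfuel
    unfold outerA
    by_cases hc : d ≥ b
    · simp only [hc, if_pos]
      have h1 : (1 : Int) * b ≤ d := by omega
      obtain ⟨p, heq, hp1, hpd⟩ := innerA_spec (d.toNat + 1) 1 d b le_rfl hb h1 (by omega)
      rw [one_mul] at heq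
      rw [heq]
      have hpb : 1 ≤ p * b := by nlinarith
      have hrec : outerA f (d - p * b) b (res + p) = (res + p) + (d - p * b) / b :=
        ih (d - p * b) b (res + p) (by omega) hb (by omega)
      rw [hrec]
      have : (d - p * b + p * b) / b = (d - p * b) / b + p :=
        Int.add_mul_ediv_right _ _ (by omega)
      have hd' : d - p * b + p * b = d := by ring
      rw [hd'] at this
      omega
    · simp only [hc, if_neg, not_false_iff]
      have : d / b = 0 := ediv_zero_of_lt hd (by omega)
      omega

-- B's bit loop: given 0 ≤ a < b * 2^n and 1 ≤ b, it computes (q + a / b, a % b)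
lemma bitLoopB_spec (n : Nat) : ∀ (q a b : Int), 0 ≤ a → 1 ≤ b →
    a < b * 2 ^ n → bitLoopB n q a b = (q + a / b, a % b) := by
  induction n with
  | zero =>
    intro q a b ha hb hlt
    simp only [pow_zero, mul_one] at hlt
    unfold bitLoopB
    rw [ediv_zero_of_lt ha hlt, Int.emod_eq_of_lt ha hlt]
    simp
  | succ i ih =>
    intro q a b ha hb hlt
    unfold bitLoopB
    by_cases hc : b * 2 ^ i ≤ a
    · simp only [hc, if_pos]
      have hlt' : a - b * 2 ^ i < b * 2 ^ i := by
        have : b * 2 ^ (i + 1) = b * 2 ^ i + b * 2 ^ i := by ring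
        omega
      rw [ih (q + 2 ^ i) (a - b * 2 ^ i) b (by omega) hb hlt']
      have hdiv : (a - b * 2 ^ i + 2 ^ i * b) / b = (a - b * 2 ^ i) / b + 2 ^ i :=
        Int.add_mul_ediv_right _ _ (by omega)
      have he : a - b * 2 ^ i + 2 ^ i * b = a := by ring
      rw [he] at hdiv
      have hmod : a % b = (a - b * 2 ^ i) % b := by
        rw [Int.emod_def, Int.emod_def, hdiv]; ring
      rw [Prod.mk.injEq]
      constructor
      · omega
      · omega
    · simp only [hc, if_neg, not_false_iff]
      have hlt2 : a < b * 2 ^ i := by omega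
      exact ih q a b ha hb hlt2

lemma ediv_le_half {a b : Int} (ha : 0 ≤ a) (hb : 2 ≤ b) (hcap : a ≤ 2 ^ 31) :
    a / b ≤ 2 ^ 30 := by
  have h0 : 0 ≤ a / b := Int.ediv_nonneg ha (by omega)
  have h1 : a / b * b ≤ a := Int.ediv_mul_le a (by omega)
  nlinarith

-- combined facts about both loops on the positive operands of the main path
lemma core (a b : Int) (ha0 : 0 ≤ a) (hacap : a ≤ 2 ^ 31) (hb2 : 2 ≤ b) :
    outerA (a.toNat + 1) a b 0 = a / b ∧ (bitLoopB 32 0 a b).1 = a / b ∧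
      0 ≤ a / b ∧ a / b ≤ 2 ^ 30 := by
  have hA : outerA (a.toNat + 1) a b 0 = 0 + a / b :=
    outerA_spec (a.toNat + 1) a b 0 ha0 (by omega) (by omega)
  have hp : (0 : Int) < 2 ^ 32 := by positivity
  have hB : bitLoopB 32 0 a b = (0 + a / b, a % b) :=
    bitLoopB_spec 32 0 a b ha0 (by omega) (by nlinarith)
  have hq0 : 0 ≤ a / b := Int.ediv_nonneg ha0 (by omega)
  have hqc : a / b ≤ 2 ^ 30 := ediv_le_half ha0 hb2 hacap
  refine ⟨by omega, by rw [hB]; omega, hq0, hqc⟩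

-- ===== VERDICT (by name: the statement is the Claim_ definition above) =====
theorem divide_spec : Claim_equal_divide := by
  intro dividend divisor hdom hpre
  unfold Spec_divide
  unfold Dom_divide pvDomInt at hdom
  simp only [Bool.and_eq_true, decide_eq_true_eq] at hdom
  obtain ⟨⟨hd1, hd2⟩, hv1, hv2⟩ := hdom
  unfold Pre_divide at hpre
  unfold divide divide_alt
  simp only [hpre, if_neg, not_false_iff]
  by_cases h1 : divisor = 1
  · subst h1
    simp only [or_true, if_pos, checkIfFlows, pvMAX]
    by_cases hd : dividend < 0 <;> simp [hd] <;> omega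
  · by_cases hm1 : divisor = -1
    · subst hm1
      norm_num [checkIfFlows, pvMAX]
      by_cases hd : dividend < 0 <;> simp [hd] <;> split_ifs <;> omega
    · -- main path: |divisor| ≥ 2
      simp only [hm1, h1, or_self, if_neg, not_false_iff]
      by_cases hdn : dividend < 0 <;> by_cases hvn : divisor < 0
      · -- dividend < 0, divisor < 0 : a = -dividend, b = -divisor, sign 1
        have hb1 : ¬ ((-divisor) = 1) := by omega
        obtain ⟨hA, hB, hq0, hqc⟩ := core (-dividend) (-divisor) (by omega) (by omega) (by omega)
        simp [makePositive, getSign, checkIfFlows, pvMAX, hdn, hvn, hb1, hA, hB]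
      · -- dividend < 0, divisor > 0 : a = -dividend, b = divisor, sign -1
        obtain ⟨hA, hB, hq0, hqc⟩ := core (-dividend) divisor (by omega) (by omega) (by omega)
        simp [makePositive, getSign, checkIfFlows, pvMAX, hdn, hvn, h1, hA, hB]
        split_ifs <;> omega
      · -- dividend ≥ 0, divisor < 0 : a = dividend, b = -divisor, sign -1
        have hb1 : ¬ ((-divisor) = 1) := by omega
        obtain ⟨hA, hB, hq0, hqc⟩ := core dividend (-divisor) (by omega) (by omega) (by omega)
        simp [makePositive, getSign, checkIfFlows, pvMAX, hdn, hvn, hb1, hA, hB]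
        simp only [Int.ediv_neg] at hq0 hqc
        split_ifs <;> omega
      · -- dividend ≥ 0, divisor > 0 : a = dividend, b = divisor, sign 1
        obtain ⟨hA, hB, hq0, hqc⟩ := core dividend divisor (by omega) (by omega) (by omega)
        simp [makePositive, getSign, checkIfFlows, pvMAX, hdn, hvn, h1, hA, hB]
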